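-- pv_equiv track=rewrite | github.com/kaustubhdeokar/Topic-wise-DSA | pythonprog/hackerank_2.py | count
-- ===== SOURCE A (Python) =====
-- def count(s):
--     returncount=0
--     for i in range(len(s)):
--         if s[i]=='p':
--             returncount+=s[:i].count('c')
--         if s[i]=='c':
--             returncount+=s[i:].count('p')
--     return returncount
-- ===== SOURCE B (Python) =====
-- def count(s):
--     # one pass: each 'p' contributes twice the number of 'c' seen so far
--     # (A counts every (c, p) pair with c before p once from the p side and once from the c side)
--     total = 0
--     ccount = 0
--     for ch in s:
--         if ch == 'c':
--             ccount += 1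
--         elif ch == 'p':
--             total += 2 * ccount
--     return total
-- ===== Notes on version B (the rewrite author's own statement) =====
-- stated objective: faster
-- what changed: A scans a prefix/suffix for every character (quadratic); B observes each (c,p) pair with c before p is counted exactly twice and does a single pass keeping a running c-count, adding 2*ccount at every 'p'.
import Mathlib
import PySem

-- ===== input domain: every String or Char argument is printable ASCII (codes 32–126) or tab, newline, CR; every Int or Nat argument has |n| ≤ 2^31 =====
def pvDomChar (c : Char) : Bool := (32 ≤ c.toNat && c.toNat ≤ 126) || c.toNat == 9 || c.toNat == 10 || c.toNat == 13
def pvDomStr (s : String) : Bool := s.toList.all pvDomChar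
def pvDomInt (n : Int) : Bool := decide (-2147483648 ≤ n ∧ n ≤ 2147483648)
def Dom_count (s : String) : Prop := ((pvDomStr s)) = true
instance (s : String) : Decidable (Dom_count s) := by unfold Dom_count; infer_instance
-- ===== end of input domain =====

-- B replaces A's per-character prefix/suffix scans by a single pass with a running c-count (faster).

-- ===== PORT A =====
-- i runs over range(len(s)), so s[i] is always in range: List.getD is exact here.
-- s[:i] = take i, s[i:] = drop i (0 ≤ i ≤ len), .count('c') = List.count.
def count (s : String) : Int :=
  let cs := s.toList
  (List.range cs.length).foldl
    (fun acc i =>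
      let acc := if cs.getD i ' ' == 'p' then acc + ((cs.take i).count 'c' : Int) else acc
      if cs.getD i ' ' == 'c' then acc + ((cs.drop i).count 'p' : Int) else acc)
    0

-- ===== PORT B =====
-- single pass over the characters, state = (running c-count, running total)
def count_alt (s : String) : Int :=
  (s.toList.foldl
    (fun (st : Int × Int) ch =>
      if ch == 'c' then (st.1 + 1, st.2)
      else if ch == 'p' then (st.1, st.2 + 2 * st.1)
      else st)
    (0, 0)).2

-- ===== PRECONDITION & SPEC =====
def Spec_count (s : String) (out : Int) : Prop := out = count_alt s
instance (s : String) (out : Int) : Decidable (Spec_count s out) := by unfold Spec_count; infer_instance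

-- ===== CLAIM (what is proved, stated in full; the proofs are below) =====
def Claim_equal_count : Prop := ∀ (s : String), Dom_count s → Spec_count s (count s)

-- ===== LEMMAS AND PROOFS =====

-- the common value: front recursion
def alist : List Char → Int
  | [] => 0
  | ch :: t => (if ch = 'c' then 2 * (t.count 'p' : Int) else 0) + alist t

-- per-index term of A's loop
def term (l : List Char) (i : Nat) : Int :=
  (if l.getD i ' ' = 'p' then ((l.take i).count 'c' : Int) else 0) +
  (if l.getD i ' ' = 'c' then ((l.drop i).count 'p' : Int) else 0)

theorem foldl_add_gen (r : List Nat) (f : Nat → Int) (c : Int) :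
    r.foldl (fun a i => a + f i) c = c + (r.map f).sum := by
  induction r generalizing c with
  | nil => simp
  | cons x xs ih => simp [List.foldl_cons, ih]; ring

theorem step_eq (l : List Char) :
    (fun (acc : Int) (i : Nat) =>
      let acc := if l.getD i ' ' == 'p' then acc + ((l.take i).count 'c' : Int) else acc
      if l.getD i ' ' == 'c' then acc + ((l.drop i).count 'p' : Int) else acc)
    = (fun a i => a + term l i) := by
  funext acc i
  simp only [term, beq_iff_eq]
  split_ifs <;> simp_all

theorem count_eq_sum (s : String) :
    count s = ((List.range s.toList.length).map (term s.toList)).sum := by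
  show (List.range s.toList.length).foldl
    (fun (acc : Int) (i : Nat) =>
      let acc := if s.toList.getD i ' ' == 'p' then acc + ((s.toList.take i).count 'c' : Int) else acc
      if s.toList.getD i ' ' == 'c' then acc + ((s.toList.drop i).count 'p' : Int) else acc)
    0 = _
  rw [step_eq, foldl_add_gen]
  simp

theorem sum_indicator_p (t : List Char) :
    ((List.range t.length).map (fun i => if t.getD i ' ' = 'p' then (1 : Int) else 0)).sum
      = (t.count 'p' : Int) := by
  induction t with
  | nil => simp
  | cons ch t ih =>
    rw [List.length_cons, List.range_succ_eq_map]
    simp only [List.map_cons, List.map_map, List.sum_cons]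
    have : ((List.range t.length).map
        (fun i => if (ch :: t).getD (i + 1) ' ' = 'p' then (1 : Int) else 0)).sum
        = (t.count 'p' : Int) := by
      rw [show (fun i => if (ch :: t).getD (i + 1) ' ' = 'p' then (1 : Int) else 0)
          = (fun i => if t.getD i ' ' = 'p' then (1 : Int) else 0) from rfl, ih]
    simp only [Function.comp_def]
    rw [this, List.count_cons]
    by_cases h : ch = 'p' <;> simp [h] <;> ring

theorem sum_term_eq_alist (l : List Char) :
    ((List.range l.length).map (term l)).sum = alist l := by
  induction l with
  | nil => simp [alist]
  | cons ch t ih =>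
    rw [List.length_cons, List.range_succ_eq_map]
    simp only [List.map_cons, List.map_map, List.sum_cons, Function.comp_def]
    have hshift : ∀ i : Nat, term (ch :: t) (i + 1)
        = term t i + (if ch = 'c' then (if t.getD i ' ' = 'p' then (1 : Int) else 0) else 0) := by
      intro i
      simp only [term, List.getD_cons_succ, List.take_succ_cons, List.drop_succ_cons,
        List.count_cons]
      generalize t.getD i ' ' = x
      by_cases h1 : x = 'p' <;> by_cases h2 : ch = 'c' <;>
        simp [h1, h2] <;> try ring
    have hsum : ((List.range t.length).map (fun i => term (ch :: t) (i + 1))).sum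
        = alist t + (if ch = 'c' then (t.count 'p' : Int) else 0) := by
      calc ((List.range t.length).map (fun i => term (ch :: t) (i + 1))).sum
          = ((List.range t.length).map (fun i => term t i
              + (if ch = 'c' then (if t.getD i ' ' = 'p' then (1 : Int) else 0) else 0))).sum := by
            congr 1; exact List.map_congr_left (fun i _ => hshift i)
        _ = ((List.range t.length).map (term t)).sum
              + ((List.range t.length).map
                  (fun i => if ch = 'c' then (if t.getD i ' ' = 'p' then (1 : Int) else 0) else 0)).sum := by
            rw [← List.sum_map_add]
        _ = alist t + (if ch = 'c' then (t.count 'p' : Int) else 0) := by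
            rw [ih]; congr 1
            by_cases hcc : ch = 'c'
            · simp only [hcc, if_true]; exact sum_indicator_p t
            · simp [hcc]
    have h0 : term (ch :: t) 0 = (if ch = 'c' then (t.count 'p' : Int) else 0) := by
      simp only [term, List.getD_cons_zero, List.take_zero, List.drop_zero,
        List.count_nil, List.count_cons]
      by_cases hcc : ch = 'c' <;> simp [hcc]
    rw [hsum, h0, alist]
    by_cases hcc : ch = 'c' <;> simp [hcc] <;> ring

-- B's fold characterization
theorem alt_fold (t : List Char) (cc tot : Int) :
    (t.foldl
      (fun (st : Int × Int) ch =>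
        if ch == 'c' then (st.1 + 1, st.2)
        else if ch == 'p' then (st.1, st.2 + 2 * st.1)
        else st)
      (cc, tot))
      = (cc + (t.count 'c' : Int), tot + 2 * cc * (t.count 'p' : Int) + alist t) := by
  induction t generalizing cc tot with
  | nil => simp [alist]
  | cons ch t ih =>
    rw [List.foldl_cons]
    by_cases hc : ch = 'c'
    · rw [if_pos (show (ch == 'c') = true by simp [hc]), ih]
      simp only [hc, alist, List.count_cons, Prod.mk.injEq]
      constructor
      · simp; ring
      · simp; ring
    · rw [if_neg (show ¬ (ch == 'c') = true by simp [hc])]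
      by_cases hp : ch = 'p'
      · rw [if_pos (show (ch == 'p') = true by simp [hp]), ih]
        simp only [hp, alist, List.count_cons, Prod.mk.injEq]
        constructor
        · simp
        · simp; ring
      · rw [if_neg (show ¬ (ch == 'p') = true by simp [hp]), ih]
        simp [hp, hc, alist]

theorem count_alt_eq_alist (s : String) : count_alt s = alist s.toList := by
  unfold count_alt
  rw [alt_fold]
  simp

-- ===== VERDICT (by name: the statement is the Claim_ definition above) =====
theorem count_spec : Claim_equal_count := by
  intro s _
  unfold Spec_count
  rw [count_eq_sum, sum_term_eq_alist, count_alt_eq_alist]
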